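-- pv_equiv track=rewrite | github.com/saurav188/python_practice_projects | chained_words.py | chainedWords
-- ===== SOURCE A (Python) =====
-- def chainedWords(words):
--     first_letters={word[0]:True for word in words}
--     last_letters={word[-1]:True for word in words}
--     for key in first_letters:
--         if last_letters.get(key)==None:
--             return False
--     for word in words:
--         if word[-1] in first_letters and first_letters[word[-1]]:
--             first_letters[word[-1]]=False
--     for key in first_letters:
--         if first_letters[key]:
--             return False
--     return True
-- ===== SOURCE B (Python) =====
-- def chainedWords(words):
--     # Single streaming pass: 'pending' holds first letters seen so far that no
--     # last letter (seen so far) has matched; at the end the chain property holds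
--     # iff nothing is still pending.
--     lasts = set()
--     pending = set()
--     for w in words:
--         lasts.add(w[-1])
--         pending.discard(w[-1])
--         if w[0] not in lasts:
--             pending.add(w[0])
--     return not pending
-- ===== Notes on version B (the rewrite author's own statement) =====
-- stated objective: alternative
-- what changed: Replaces A's three staged passes over dict-of-flags (build both dicts, missing-key check, marking loop, final flag scan) by one streaming pass that maintains a set of still-unmatched first letters and returns whether it ends empty.
import Mathlib
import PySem

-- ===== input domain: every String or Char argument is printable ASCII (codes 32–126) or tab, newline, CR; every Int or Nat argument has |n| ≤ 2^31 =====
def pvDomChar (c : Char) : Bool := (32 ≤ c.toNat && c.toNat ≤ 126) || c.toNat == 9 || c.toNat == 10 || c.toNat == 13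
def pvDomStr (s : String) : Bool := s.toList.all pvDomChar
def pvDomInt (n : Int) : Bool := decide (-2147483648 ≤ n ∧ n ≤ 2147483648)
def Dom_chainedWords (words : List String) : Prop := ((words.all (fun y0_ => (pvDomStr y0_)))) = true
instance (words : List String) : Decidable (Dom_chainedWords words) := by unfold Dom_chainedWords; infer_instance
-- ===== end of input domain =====

-- B replaces A's staged dict-of-flags passes by one streaming pass over the words
-- that keeps a set of still-unmatched first letters (alternative decomposition).

-- ===== PORT A =====
-- w[0] and w[-1]; total via a default, exact under Pre_ (every word nonempty)
def pvFirst (w : String) : Char := PySem.List.pyGetD w.toList 0 ' '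
def pvLast (w : String) : Char := PySem.List.pyGetD w.toList (-1) ' '

def chainedWords (words : List String) : Bool :=
  let fl : PySem.Dict Char Bool :=
    words.foldl (fun d w => d.insert (pvFirst w) true) PySem.Dict.empty
  let ll : PySem.Dict Char Bool :=
    words.foldl (fun d w => d.insert (pvLast w) true) PySem.Dict.empty
  if fl.keys.any (fun k => (ll.get? k).isNone) then false
  else
    let fl2 :=
      words.foldl (fun d w =>
        if d.contains (pvLast w) && d.getD (pvLast w) false
        then d.insert (pvLast w) false else d) fl
    if fl2.keys.any (fun k => fl2.getD k false) then false else true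

-- ===== PORT B =====
-- one iteration of Source B's loop body on the state (lasts, pending)
def pvStep (st : PySem.Set Char × PySem.Set Char) (w : String) :
    PySem.Set Char × PySem.Set Char :=
  let lasts := PySem.Set.add st.1 (pvLast w)
  let pending := PySem.Set.discard st.2 (pvLast w)
  let pending :=
    if PySem.Set.contains lasts (pvFirst w) then pending
    else PySem.Set.add pending (pvFirst w)
  (lasts, pending)

def chainedWords_alt (words : List String) : Bool :=
  let st := words.foldl pvStep (PySem.Set.empty, PySem.Set.empty)
  st.2.isEmpty

-- ===== PRECONDITION & SPEC =====
-- Pre_ excludes lists containing an empty string, on which Python A raises IndexError.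
def Pre_chainedWords (words : List String) : Prop := ∀ w ∈ words, w ≠ ""
instance (words : List String) : Decidable (Pre_chainedWords words) := by
  unfold Pre_chainedWords; infer_instance

def pvWitness_chainedWords : List String := ["ab", "bc", "ca"]

def Spec_chainedWords (words : List String) (out : Bool) : Prop := out = chainedWords_alt words
instance (words : List String) (out : Bool) : Decidable (Spec_chainedWords words out) := by
  unfold Spec_chainedWords; infer_instance

-- ===== CLAIM (what is proved, stated in full; the proofs are below) =====
def Claim_equal_chainedWords : Prop :=
  ∀ (words : List String), Dom_chainedWords words → Pre_chainedWords words →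
    Spec_chainedWords words (chainedWords words)

-- ===== LEMMAS AND PROOFS =====

-- A's marking loop: it sets the flag at `pvLast w` to false for processed words
-- (when present), leaves other keys alone, and never changes the key set.
theorem pv_getD_mark_loop (ws : List String) (d : PySem.Dict Char Bool) (k : Char) :
    (ws.foldl (fun d w =>
        if d.contains (pvLast w) && d.getD (pvLast w) false
        then d.insert (pvLast w) false else d) d).getD k false
      = (if d.contains k ∧ k ∈ ws.map pvLast then false else d.getD k false) := by
  induction ws generalizing d with
  | nil => simp
  | cons w ws ih =>
    simp only [List.foldl_cons, List.map_cons, List.mem_cons]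
    by_cases hc : d.contains (pvLast w) && d.getD (pvLast w) false
    · simp only [hc, if_true, ih, PySem.Dict.getD_insert, PySem.Dict.contains_insert]
      simp only [Bool.and_eq_true] at hc
      by_cases hk : k = pvLast w
      · simp [hk, hc.1]
      · simp only [hk, if_false]
        by_cases hck : d.contains k <;> simp [hck, hk, beq_iff_eq]
    · simp only [hc, ih]
      by_cases hck : d.contains k = true
      · by_cases hk : k = pvLast w
        · subst hk
          simp only [Bool.and_eq_true] at hc
          have hdk : d.getD (pvLast w) false = false := by
            cases h : d.getD (pvLast w) false
            · rfl
            · exact absurd ⟨hck, h⟩ hc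
          simp [hck, hdk]
        · simp [hck, hk]
      · simp [hck]

theorem pv_keys_fold_insert_true {β : Type} (l : List β) (key : β → Char) :
    ((l.foldl (fun d x => d.insert (key x) true) PySem.Dict.empty).keys : List Char)
      = PySem.Set.ofList (l.map key) := by
  have h := PySem.Dict.keys_foldl_insert_key l key
    (fun (_ : PySem.Dict Char Bool) (_ : β) => true) PySem.Dict.empty
  simpa [PySem.Set.update, PySem.Set.ofList_eq_foldl] using h

theorem pv_keys_mark_loop (ws : List String) (d : PySem.Dict Char Bool) :
    (ws.foldl (fun d w =>
        if d.contains (pvLast w) && d.getD (pvLast w) false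
        then d.insert (pvLast w) false else d) d).keys = d.keys := by
  induction ws generalizing d with
  | nil => rfl
  | cons w ws ih =>
    simp only [List.foldl_cons]
    by_cases hc : (d.contains (pvLast w) && d.getD (pvLast w) false) = true
    · rw [if_pos hc, ih]
      simp only [Bool.and_eq_true] at hc
      exact PySem.Dict.keys_insert_of_contains d false hc.1
    · rw [if_neg hc]
      exact ih d

-- a chainedWords value characterisation: A computes "first letters ⊆ last letters"
theorem pv_portA_eq (words : List String) :
    chainedWords words
      = decide (∀ k ∈ words.map pvFirst, k ∈ words.map pvLast) := by
  unfold chainedWords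
  simp only []
  set F := words.map pvFirst with hF
  set L := words.map pvLast with hL
  have hflkeys := pv_keys_fold_insert_true words pvFirst
  have hllkeys := pv_keys_fold_insert_true words pvLast
  by_cases hsub : ∀ k ∈ F, k ∈ L
  · -- first check passes, marking zeroes every flag, so the result is true
    have h1 : (words.foldl (fun d w => d.insert (pvFirst w) true) PySem.Dict.empty).keys.any
        (fun k => ((words.foldl (fun d w => d.insert (pvLast w) true) PySem.Dict.empty).get? k).isNone) = false := by
      rw [List.any_eq_false]
      intro k hk
      rw [hflkeys, PySem.Set.mem_ofList] at hk
      have : k ∈ (words.foldl (fun d w => d.insert (pvLast w) true) PySem.Dict.empty).keys := by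
        rw [hllkeys, PySem.Set.mem_ofList]; exact hsub k hk
      simp [Option.isNone_iff_eq_none, PySem.Dict.get?_eq_none_iff_not_mem_keys, this]
    rw [h1]
    simp only [Bool.false_eq_true, if_false]
    have h2 : ((words.foldl (fun d w =>
          if d.contains (pvLast w) && d.getD (pvLast w) false
          then d.insert (pvLast w) false else d)
          (words.foldl (fun d w => d.insert (pvFirst w) true) PySem.Dict.empty)).keys).any
        (fun k => (words.foldl (fun d w =>
          if d.contains (pvLast w) && d.getD (pvLast w) false
          then d.insert (pvLast w) false else d)
          (words.foldl (fun d w => d.insert (pvFirst w) true) PySem.Dict.empty)).getD k false) = false := by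
      rw [List.any_eq_false]
      intro k hk
      rw [pv_keys_mark_loop, hflkeys, PySem.Set.mem_ofList] at hk
      rw [pv_getD_mark_loop]
      have hcont : (words.foldl (fun d w => d.insert (pvFirst w) true) PySem.Dict.empty).contains k = true := by
        rw [PySem.Dict.contains_iff_mem_keys, hflkeys, PySem.Set.mem_ofList]; exact hk
      rw [if_pos ⟨hcont, hsub k hk⟩]
      simp
    rw [h2]
    simp only [Bool.false_eq_true, if_false]
    exact (decide_eq_true hsub).symm
  · -- some first letter is missing from the last letters: first check fires, result false
    push Not at hsub
    obtain ⟨k, hkF, hkL⟩ := hsub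
    have h1 : (words.foldl (fun d w => d.insert (pvFirst w) true) PySem.Dict.empty).keys.any
        (fun k => ((words.foldl (fun d w => d.insert (pvLast w) true) PySem.Dict.empty).get? k).isNone) = true := by
      rw [List.any_eq_true]
      refine ⟨k, ?_, ?_⟩
      · rw [hflkeys, PySem.Set.mem_ofList]; exact hkF
      · rw [Option.isNone_iff_eq_none, PySem.Dict.get?_eq_none_iff_not_mem_keys,
          hllkeys, PySem.Set.mem_ofList]; exact hkL
    rw [h1]
    simp only [if_true]
    symm
    simp only [decide_eq_false_iff_not]
    intro h
    exact hkL (h k hkF)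

-- B's loop invariant: after the fold, `lasts` holds the last letters seen and
-- `pending` holds exactly the first letters with no matching last letter.
theorem pv_fold_mem (ws : List String) (L P : PySem.Set Char) (F : List Char)
    (hP : ∀ k, k ∈ P ↔ k ∈ F ∧ k ∉ L) :
    (∀ k, k ∈ (ws.foldl pvStep (L, P)).1 ↔ k ∈ L ∨ k ∈ ws.map pvLast) ∧
    (∀ k, k ∈ (ws.foldl pvStep (L, P)).2 ↔
        (k ∈ F ∨ k ∈ ws.map pvFirst) ∧ k ∉ L ∧ k ∉ ws.map pvLast) := by
  induction ws generalizing L P F with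
  | nil =>
    refine ⟨by simp, fun k => ?_⟩
    simpa using (hP k).trans (by tauto)
  | cons w ws ih =>
    simp only [List.foldl_cons, pvStep]
    by_cases hc : PySem.Set.contains (PySem.Set.add L (pvLast w)) (pvFirst w) = true
    · rw [if_pos hc]
      rw [PySem.Set.contains_iff, PySem.Set.mem_add] at hc
      obtain ⟨h1, h2⟩ := ih (PySem.Set.add L (pvLast w)) (PySem.Set.discard P (pvLast w))
        (F ++ [pvFirst w]) (fun k => by
          rw [PySem.Set.mem_discard, PySem.Set.mem_add, hP k, List.mem_append,
              List.mem_singleton]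
          constructor
          · rintro ⟨⟨hkF, hkL⟩, hkl⟩; exact ⟨Or.inl hkF, by tauto⟩
          · rintro ⟨hkF | hkf, hk⟩
            · exact ⟨⟨hkF, fun h => hk (Or.inl h)⟩, fun h => hk (Or.inr h)⟩
            · subst hkf; exact absurd (by tauto : pvFirst w ∈ L ∨ pvFirst w = pvLast w) (by tauto)
          )
      refine ⟨fun k => ?_, fun k => ?_⟩
      · rw [h1 k, PySem.Set.mem_add]; simp; tauto
      · rw [h2 k, PySem.Set.mem_add, List.mem_append, List.mem_singleton]
        simp only [List.map_cons, List.mem_cons]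
        tauto
    · rw [if_neg hc]
      rw [PySem.Set.contains_iff, PySem.Set.mem_add] at hc
      push Not at hc
      obtain ⟨h1, h2⟩ := ih (PySem.Set.add L (pvLast w))
        (PySem.Set.add (PySem.Set.discard P (pvLast w)) (pvFirst w))
        (F ++ [pvFirst w]) (fun k => by
          rw [PySem.Set.mem_add, PySem.Set.mem_discard, PySem.Set.mem_add, hP k,
              List.mem_append, List.mem_singleton]
          constructor
          · rintro (⟨⟨hkF, hkL⟩, hkl⟩ | hkf)
            · exact ⟨Or.inl hkF, by tauto⟩
            · subst hkf; exact ⟨Or.inr rfl, by tauto⟩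
          · rintro ⟨hkF | hkf, hk⟩
            · exact Or.inl ⟨⟨hkF, fun h => hk (Or.inl h)⟩, fun h => hk (Or.inr h)⟩
            · exact Or.inr hkf
          )
      refine ⟨fun k => ?_, fun k => ?_⟩
      · rw [h1 k, PySem.Set.mem_add]; simp; tauto
      · rw [h2 k, PySem.Set.mem_add, List.mem_append, List.mem_singleton]
        simp only [List.map_cons, List.mem_cons]
        tauto

theorem pv_portB_eq (words : List String) :
    chainedWords_alt words
      = decide (∀ k ∈ words.map pvFirst, k ∈ words.map pvLast) := by
  unfold chainedWords_alt
  obtain ⟨_, h2⟩ := pv_fold_mem words PySem.Set.empty PySem.Set.empty []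
    (fun k => by simp [PySem.Set.empty])
  rw [Bool.eq_iff_iff]
  rw [List.isEmpty_iff, List.eq_nil_iff_forall_not_mem]
  simp only [decide_eq_true_eq]
  constructor
  · intro h k hk
    by_contra hkl
    exact h k ((h2 k).2 ⟨Or.inr hk, by simp [PySem.Set.empty], hkl⟩)
  · intro h k hk
    rcases (h2 k).1 hk with ⟨hf | hf, _, hl⟩
    · exact absurd hf (by simp)
    · exact hl (h k hf)

-- ===== VERDICT (by name: the statement is the Claim_ definition above) =====
theorem chainedWords_spec : Claim_equal_chainedWords := by
  intro words _ _
  unfold Spec_chainedWords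
  rw [pv_portA_eq, pv_portB_eq]
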